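-- pv_equiv track=rewrite | github.com/wht306528-prog/sorting_robot | scripts/evaluate_pingpong_annotations.py | annotation_to_matrix
-- ===== SOURCE A (Python) =====
-- from typing import Any
--
-- ROWS = 10
--
-- COLS = 5
--
-- TRAYS = 3
--
-- CLASS_NAMES = {
--     0: 'empty',
--     1: 'white',
--     2: 'yellow',
-- }
--
-- def annotation_to_matrix(annotation: dict[str, Any]) -> dict[tuple[int, int, int], int]:
--     matrices = annotation.get('matrices_by_tray', {})
--     output: dict[tuple[int, int, int], int] = {}
--     for tray_id in range(1, TRAYS + 1):
--         matrix = matrices.get(str(tray_id), [])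
--         for row in range(1, ROWS + 1):
--             for col in range(1, COLS + 1):
--                 value = 0
--                 if row - 1 < len(matrix) and col - 1 < len(matrix[row - 1]):
--                     value = normalize_class_id(matrix[row - 1][col - 1])
--                 output[(tray_id, row, col)] = value
--     return output
--
-- def normalize_class_id(value: Any) -> int:
--     try:
--         class_id = int(value)
--     except (TypeError, ValueError):
--         return 0
--     return class_id if class_id in CLASS_NAMES else 0
-- ===== SOURCE B (Python) =====
-- from typing import Any
--
-- ROWS = 10
-- COLS = 5
-- TRAYS = 3
--
--
-- def annotation_to_matrix(annotation: dict[str, Any]) -> dict[tuple[int, int, int], int]: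
--     matrices = annotation.get('matrices_by_tray', {})
--
--     def cell(n: int) -> tuple[tuple[int, int, int], int]:
--         # decode the flat index n (0..149) into tray/row/col arithmetically
--         tray, rc = divmod(n, ROWS * COLS)
--         row, col = divmod(rc, COLS)
--         m = matrices.get(str(tray + 1), [])
--         r = m[row] if row < len(m) else []
--         v = r[col] if col < len(r) else 0
--         return (tray + 1, row + 1, col + 1), _clamp(v)
--
--     return dict(map(cell, range(TRAYS * ROWS * COLS)))
--
--
-- def _clamp(value: Any) -> int:
--     try:
--         v = int(value)
--     except (TypeError, ValueError):
--         return 0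
--     return v if 0 <= v <= 2 else 0
-- ===== Notes on version B (the rewrite author's own statement) =====
-- stated objective: alternative
-- what changed: B replaces A's three nested loops with a per-cell bounds test by a single flat pass over the linear indices 0..149, decoding each index into (tray,row,col) via divmod, reading ragged data through defaulted row/cell lookups, and building the dict once from the resulting (key,value) stream.
import Mathlib
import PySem

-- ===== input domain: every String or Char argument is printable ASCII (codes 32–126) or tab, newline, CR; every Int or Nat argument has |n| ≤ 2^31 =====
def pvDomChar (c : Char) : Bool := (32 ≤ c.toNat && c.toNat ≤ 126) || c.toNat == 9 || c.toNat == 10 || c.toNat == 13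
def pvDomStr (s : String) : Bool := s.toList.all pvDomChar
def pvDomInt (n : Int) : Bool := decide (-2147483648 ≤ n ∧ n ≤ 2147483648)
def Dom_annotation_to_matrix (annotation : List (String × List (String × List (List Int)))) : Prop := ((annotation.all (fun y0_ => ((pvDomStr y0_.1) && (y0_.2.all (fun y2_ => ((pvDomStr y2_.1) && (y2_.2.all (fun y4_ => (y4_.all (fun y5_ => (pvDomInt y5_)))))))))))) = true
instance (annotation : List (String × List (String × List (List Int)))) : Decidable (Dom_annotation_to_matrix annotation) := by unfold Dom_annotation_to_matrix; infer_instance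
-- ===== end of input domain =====

-- B replaces A's three nested loops with per-cell bounds tests by a single flat pass over the
-- linear indices 0..149, decoding each index into (tray,row,col) with divmod and reading the
-- (possibly ragged) data through defaulted row/cell lookups; alternative decomposition, not claimed faster.

-- ===== PORT A =====
def pvClassNames : PySem.Dict Int String :=
  PySem.Dict.mk [(0, "empty"), (1, "white"), (2, "yellow")]

-- int(value) on an int is the identity and never raises; 'class_id in CLASS_NAMES' is key membership
def normalize_class_id (value : Int) : Int :=
  if pvClassNames.contains value then value else 0

def annotation_to_matrix (annotation : List (String × List (String × List (List Int)))) : List (Int × Int × Int × Int) :=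
  let matrices := (PySem.Dict.mk annotation).getD "matrices_by_tray" []
  let out : PySem.Dict (Int × Int × Int) Int :=
    (PySem.List.pyRange 1 (3 + 1) 1).foldl (fun d tray_id =>
      let matrix := (PySem.Dict.mk matrices).getD (PySem.Int.toStr tray_id) []
      (PySem.List.pyRange 1 (10 + 1) 1).foldl (fun d row =>
        (PySem.List.pyRange 1 (5 + 1) 1).foldl (fun d col =>
          -- matrix[row-1][col-1] is only read under the bounds guard, so the getD defaults are never used
          let value : Int :=
            if row - 1 < (matrix.length : Int) ∧
               col - 1 < ((((PySem.List.pyGet? matrix (row - 1)).getD []).length : Int)) then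
              normalize_class_id ((PySem.List.pyGet? ((PySem.List.pyGet? matrix (row - 1)).getD []) (col - 1)).getD 0)
            else 0
          d.insert (tray_id, row, col) value) d) d) PySem.Dict.empty
  out.items.map (fun p => (p.1.1, p.1.2.1, p.1.2.2, p.2))

-- ===== PORT B =====
-- _clamp of Source B: int(value) on an int is the identity and never raises
def pvClampB (v : Int) : Int := if 0 ≤ v ∧ v ≤ 2 then v else 0

-- the inner function 'cell' of Source B (matrices passed explicitly)
def pvCellB (matrices : List (String × List (List Int))) (n : Int) : (Int × Int × Int) × Int :=
  let tray := PySem.Int.floordiv n (10 * 5)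
  let rc := PySem.Int.mod n (10 * 5)
  let row := PySem.Int.floordiv rc 5
  let col := PySem.Int.mod rc 5
  let m := (PySem.Dict.mk matrices).getD (PySem.Int.toStr (tray + 1)) []
  -- m[row] / r[col] are only read under 'row < len(m)' / 'col < len(r)', so the getD defaults are never used
  let r := if row < (m.length : Int) then (PySem.List.pyGet? m row).getD [] else []
  let v := if col < (r.length : Int) then (PySem.List.pyGet? r col).getD 0 else 0
  ((tray + 1, row + 1, col + 1), pvClampB v)

def annotation_to_matrix_alt (annotation : List (String × List (String × List (List Int)))) : List (Int × Int × Int × Int) :=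
  let matrices := (PySem.Dict.mk annotation).getD "matrices_by_tray" []
  let pairs := (PySem.List.pyRange 0 (3 * 10 * 5) 1).map (pvCellB matrices)
  -- dict(pairs): inserted in list order
  let out : PySem.Dict (Int × Int × Int) Int :=
    pairs.foldl (fun d p => d.insert p.1 p.2) PySem.Dict.empty
  out.items.map (fun p => (p.1.1, p.1.2.1, p.1.2.2, p.2))

-- ===== PRECONDITION & SPEC =====
def Spec_annotation_to_matrix (annotation : List (String × List (String × List (List Int)))) (out : List (Int × Int × Int × Int)) : Prop := out = annotation_to_matrix_alt annotation
instance (annotation : List (String × List (String × List (List Int)))) (out : List (Int × Int × Int × Int)) : Decidable (Spec_annotation_to_matrix annotation out) := by unfold Spec_annotation_to_matrix; infer_instance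

-- ===== CLAIM =====
def Claim_equal_annotation_to_matrix : Prop := ∀ (annotation : List (String × List (String × List (List Int)))), Dom_annotation_to_matrix annotation → Spec_annotation_to_matrix annotation (annotation_to_matrix annotation)

-- ===== LEMMAS AND PROOFS =====

-- the key stream of A's triple loop
def pvGridKeys : List (Int × Int × Int) :=
  (PySem.List.pyRange 1 (3 + 1) 1).flatMap (fun t =>
    (PySem.List.pyRange 1 (10 + 1) 1).flatMap (fun r =>
      (PySem.List.pyRange 1 (5 + 1) 1).map (fun c => (t, r, c))))

-- A's per-cell value, as a function of the tray/row/col key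
def pvValA (matrices : List (String × List (List Int))) (k : Int × Int × Int) : Int :=
  let matrix := (PySem.Dict.mk matrices).getD (PySem.Int.toStr k.1) []
  if k.2.1 - 1 < (matrix.length : Int) ∧
     k.2.2 - 1 < ((((PySem.List.pyGet? matrix (k.2.1 - 1)).getD []).length : Int)) then
    normalize_class_id ((PySem.List.pyGet? ((PySem.List.pyGet? matrix (k.2.1 - 1)).getD []) (k.2.2 - 1)).getD 0)
  else 0

-- the key decoded from the flat index n by Source B's divmods
def pvKeyN (n : Nat) : Int × Int × Int :=
  (((n / 50 : Nat) : Int) + 1, ((n % 50 / 5 : Nat) : Int) + 1, ((n % 50 % 5 : Nat) : Int) + 1)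

set_option maxRecDepth 40000 in
lemma pvGridKeys_nodup : pvGridKeys.Nodup := by decide

set_option maxRecDepth 40000 in
lemma pvRange150 : PySem.List.pyRange 0 (3 * 10 * 5) 1 = (List.range 150).map Int.ofNat := by decide

set_option maxRecDepth 40000 in
lemma pvGrid_eq : pvGridKeys = (List.range 150).map pvKeyN := by decide

lemma pvA_items (matrices : List (String × List (List Int))) :
    ((PySem.List.pyRange 1 (3 + 1) 1).foldl (fun d tray_id =>
      let matrix := (PySem.Dict.mk matrices).getD (PySem.Int.toStr tray_id) []
      (PySem.List.pyRange 1 (10 + 1) 1).foldl (fun d row =>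
        (PySem.List.pyRange 1 (5 + 1) 1).foldl (fun d col =>
          let value : Int :=
            if row - 1 < (matrix.length : Int) ∧
               col - 1 < ((((PySem.List.pyGet? matrix (row - 1)).getD []).length : Int)) then
              normalize_class_id ((PySem.List.pyGet? ((PySem.List.pyGet? matrix (row - 1)).getD []) (col - 1)).getD 0)
            else 0
          d.insert (tray_id, row, col) value) d) d) (PySem.Dict.empty : PySem.Dict (Int × Int × Int) Int)).items
    = pvGridKeys.map (fun k => (k, pvValA matrices k)) := by
  have h : ((PySem.List.pyRange 1 (3 + 1) 1).foldl (fun d tray_id =>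
      let matrix := (PySem.Dict.mk matrices).getD (PySem.Int.toStr tray_id) []
      (PySem.List.pyRange 1 (10 + 1) 1).foldl (fun d row =>
        (PySem.List.pyRange 1 (5 + 1) 1).foldl (fun d col =>
          let value : Int :=
            if row - 1 < (matrix.length : Int) ∧
               col - 1 < ((((PySem.List.pyGet? matrix (row - 1)).getD []).length : Int)) then
              normalize_class_id ((PySem.List.pyGet? ((PySem.List.pyGet? matrix (row - 1)).getD []) (col - 1)).getD 0)
            else 0
          d.insert (tray_id, row, col) value) d) d) (PySem.Dict.empty : PySem.Dict (Int × Int × Int) Int))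
      = pvGridKeys.foldl (fun d k => d.insert k (pvValA matrices k)) PySem.Dict.empty := by
    simp only [pvGridKeys, List.foldl_flatMap]
    rfl
  rw [h]
  have h2 := PySem.Dict.items_foldl_insert_fresh (d := (PySem.Dict.empty : PySem.Dict (Int × Int × Int) Int))
      (l := pvGridKeys) (k := fun x => x) (v := fun k => pvValA matrices k)
      (fun a _ => PySem.Dict.contains_empty a) (by simpa using pvGridKeys_nodup)
  simpa using h2

lemma pvClamp_eq (v : Int) : pvClampB v = normalize_class_id v := by
  by_cases h0 : v = 0
  · simp [pvClampB, normalize_class_id, pvClassNames, PySem.Dict.contains_mk, h0]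
  · by_cases h1 : v = 1
    · simp [pvClampB, normalize_class_id, pvClassNames, PySem.Dict.contains_mk, h1]
    · by_cases h2 : v = 2
      · simp [pvClampB, normalize_class_id, pvClassNames, PySem.Dict.contains_mk, h2]
      · simp [pvClampB, normalize_class_id, pvClassNames, PySem.Dict.contains_mk]
        omega

lemma pvClamp_zero : pvClampB 0 = 0 := by decide

-- Source B's cell at flat index n computes exactly (key, A's value at that key)
lemma pvCellB_eq (matrices : List (String × List (List Int))) (n : Nat) :
    pvCellB matrices (Int.ofNat n) = (pvKeyN n, pvValA matrices (pvKeyN n)) := by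
  have htray : PySem.Int.floordiv (Int.ofNat n) (10 * 5) = ((n / 50 : Nat) : Int) := by
    exact_mod_cast PySem.Int.floordiv_natCast n 50
  have hrc : PySem.Int.mod (Int.ofNat n) (10 * 5) = ((n % 50 : Nat) : Int) := by
    exact_mod_cast PySem.Int.mod_natCast n 50
  have hrow : PySem.Int.floordiv ((n % 50 : Nat) : Int) 5 = ((n % 50 / 5 : Nat) : Int) := by
    exact_mod_cast PySem.Int.floordiv_natCast (n % 50) 5
  have hcol : PySem.Int.mod ((n % 50 : Nat) : Int) 5 = ((n % 50 % 5 : Nat) : Int) := by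
    exact_mod_cast PySem.Int.mod_natCast (n % 50) 5
  simp only [pvCellB, pvValA, pvKeyN, htray, hrc, hrow, hcol]
  set m := (PySem.Dict.mk matrices).getD (PySem.Int.toStr (((n / 50 : Nat) : Int) + 1)) [] with hm
  have hk1 : (((n % 50 / 5 : Nat) : Int) + 1) - 1 = ((n % 50 / 5 : Nat) : Int) := by ring
  have hk2 : (((n % 50 % 5 : Nat) : Int) + 1) - 1 = ((n % 50 % 5 : Nat) : Int) := by ring
  simp only [hk1, hk2, PySem.List.pyGet?_natCast]
  by_cases hr : n % 50 / 5 < m.length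
  · have hrI : ((n % 50 / 5 : Nat) : Int) < (m.length : Int) := by exact_mod_cast hr
    have hget : m[n % 50 / 5]?.getD [] = m.getD (n % 50 / 5) [] := by
      simp [List.getD_eq_getElem?_getD]
    rw [if_pos hrI, hget]
    by_cases hc : n % 50 % 5 < (m.getD (n % 50 / 5) []).length
    · have hcI : ((n % 50 % 5 : Nat) : Int) < ((m.getD (n % 50 / 5) []).length : Int) := by
        exact_mod_cast hc
      rw [if_pos hcI, if_pos ⟨hrI, hcI⟩]
      simp only [List.getD_eq_getElem?_getD]
      exact congrArg (Prod.mk _) (pvClamp_eq _)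
    · have hcI : ¬ ((n % 50 % 5 : Nat) : Int) < ((m.getD (n % 50 / 5) []).length : Int) := by
        exact_mod_cast hc
      rw [if_neg hcI, if_neg (by intro h; exact hcI h.2)]
      exact congrArg (Prod.mk _) pvClamp_zero
  · have hrI : ¬ ((n % 50 / 5 : Nat) : Int) < (m.length : Int) := by exact_mod_cast hr
    rw [if_neg hrI]
    rw [if_neg (show ¬ ((n % 50 % 5 : Nat) : Int) < (([] : List Int).length : Int) by
      simp only [List.length_nil]; omega)]
    rw [if_neg (fun h => hrI h.1)]
    exact congrArg (Prod.mk _) pvClamp_zero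

lemma pvB_pairs (matrices : List (String × List (List Int))) :
    (PySem.List.pyRange 0 (3 * 10 * 5) 1).map (pvCellB matrices)
      = pvGridKeys.map (fun k => (k, pvValA matrices k)) := by
  rw [pvRange150, pvGrid_eq, List.map_map, List.map_map]
  exact List.map_congr_left (fun n _ => pvCellB_eq matrices n)

-- ===== VERDICT =====
set_option maxRecDepth 40000 in
theorem annotation_to_matrix_spec : Claim_equal_annotation_to_matrix := by
  intro ann _
  show annotation_to_matrix ann = annotation_to_matrix_alt ann
  have hA0 : annotation_to_matrix ann =
      ((PySem.List.pyRange 1 (3 + 1) 1).foldl (fun d tray_id =>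
        let matrix := (PySem.Dict.mk ((PySem.Dict.mk ann).getD "matrices_by_tray" [])).getD (PySem.Int.toStr tray_id) []
        (PySem.List.pyRange 1 (10 + 1) 1).foldl (fun d row =>
          (PySem.List.pyRange 1 (5 + 1) 1).foldl (fun d col =>
            let value : Int :=
              if row - 1 < (matrix.length : Int) ∧
                 col - 1 < ((((PySem.List.pyGet? matrix (row - 1)).getD []).length : Int)) then
                normalize_class_id ((PySem.List.pyGet? ((PySem.List.pyGet? matrix (row - 1)).getD []) (col - 1)).getD 0)
              else 0
            d.insert (tray_id, row, col) value) d) d) (PySem.Dict.empty : PySem.Dict (Int × Int × Int) Int)).items.map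
        (fun p => (p.1.1, p.1.2.1, p.1.2.2, p.2)) := rfl
  have hB0 : annotation_to_matrix_alt ann =
      (((PySem.List.pyRange 0 (3 * 10 * 5) 1).map (pvCellB ((PySem.Dict.mk ann).getD "matrices_by_tray" []))).foldl
        (fun d p => d.insert p.1 p.2) (PySem.Dict.empty : PySem.Dict (Int × Int × Int) Int)).items.map
        (fun p => (p.1.1, p.1.2.1, p.1.2.2, p.2)) := rfl
  rw [hA0, hB0, pvA_items]
  have hBitems : (((PySem.List.pyRange 0 (3 * 10 * 5) 1).map (pvCellB ((PySem.Dict.mk ann).getD "matrices_by_tray" []))).foldl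
      (fun d p => d.insert p.1 p.2) (PySem.Dict.empty : PySem.Dict (Int × Int × Int) Int)).items
      = pvGridKeys.map (fun k => (k, pvValA ((PySem.Dict.mk ann).getD "matrices_by_tray" []) k)) := by
    rw [pvB_pairs]
    have h2 := PySem.Dict.items_foldl_insert_fresh (d := (PySem.Dict.empty : PySem.Dict (Int × Int × Int) Int))
        (l := pvGridKeys.map (fun k => (k, pvValA ((PySem.Dict.mk ann).getD "matrices_by_tray" []) k)))
        (k := Prod.fst) (v := Prod.snd)
        (fun a _ => PySem.Dict.contains_empty a.1)
        (by rw [List.map_map]; simpa using pvGridKeys_nodup)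
    simpa using h2
  rw [hBitems]
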